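-- pv_equiv track=rewrite | github.com/dasom-jo/multi_campus | text.py | log
-- ===== SOURCE A (Python) =====
-- def log(logs:list[str]) -> list[str]:
--     letter_log = []
--     number_log = []
--     for i in logs:
--         if i.split()[1].isalpha():
--             letter_log.append(i)
--         else:
--             number_log.append(i)
--     letter_log.sort(key = lambda x: (x.split()[1:],x.split()[0]))
--     return letter_log + number_log
-- ===== SOURCE B (Python) =====
-- def log(logs: list[str]) -> list[str]:
--     def key(x):
--         words = x.split()
--         if words[1].isalpha():
--             return (0, words[1:], words[0])
--         return (1, [], '')
--     return sorted(logs, key=key)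
-- ===== Notes on version B (the rewrite author's own statement) =====
-- stated objective: idiomatic
-- what changed: Replaces the explicit two-list partition loop, in-place sort of the letter list and concatenation by a single stable sorted() over all logs with a composite key ((0, rest, id) for letter logs, (1, [], '') for number logs), so group membership, ordering and the stability of number logs are all expressed by one key function.
import Mathlib
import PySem

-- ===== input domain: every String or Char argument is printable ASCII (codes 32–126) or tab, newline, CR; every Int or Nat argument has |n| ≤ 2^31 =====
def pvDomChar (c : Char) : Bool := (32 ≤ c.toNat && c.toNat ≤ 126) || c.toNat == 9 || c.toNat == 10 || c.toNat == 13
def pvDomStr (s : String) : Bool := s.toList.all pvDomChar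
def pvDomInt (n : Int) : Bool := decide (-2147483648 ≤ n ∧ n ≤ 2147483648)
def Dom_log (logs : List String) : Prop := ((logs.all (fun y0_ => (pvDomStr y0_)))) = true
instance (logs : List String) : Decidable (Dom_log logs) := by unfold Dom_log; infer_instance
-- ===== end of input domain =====

-- B replaces A's partition-loop + in-place sort + concatenation by one stable sort of all
-- logs under a composite key (idiomatic decomposition; same observable behaviour on Pre_log).
-- ===== PORT A =====
def log (logs : List String) : List String :=
  let pz := logs.foldl
    (fun (acc : List String × List String) i =>
      if PySem.Str.strIsalpha (PySem.List.pyGetD (PySem.Str.split₀ i) 1 "")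
      then (acc.1 ++ [i], acc.2)
      else (acc.1, acc.2 ++ [i]))
    ([], [])
  -- letter_log.sort(key = lambda x: (x.split()[1:], x.split()[0])) then letter_log + number_log
  PySem.List.sorted2 pz.1
    (fun x => PySem.List.slice (PySem.Str.split₀ x) (some 1) none)
    (fun x => PySem.List.pyGetD (PySem.Str.split₀ x) 0 "") ++ pz.2

-- ===== PORT B =====
-- key(x) of Source B: (0, words[1:], words[0]) for letter logs, (1, [], '') for number logs
def logKey (x : String) : Int × List String × String :=
  let words := PySem.Str.split₀ x
  if PySem.Str.strIsalpha (PySem.List.pyGetD words 1 "")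
  then (0, PySem.List.slice words (some 1) none, PySem.List.pyGetD words 0 "")
  else (1, [], "")

-- Python's lexicographic '<' on the key tuples; exact here because '<' on Int, List String and
-- String is total, so 'not (b < a)' at a component coincides with Python's '==' step
def logTupLt (a b : Int × List String × String) : Bool :=
  decide (a.1 < b.1) || (!decide (b.1 < a.1) &&
    (decide (a.2.1 < b.2.1) || (!decide (b.2.1 < a.2.1) && decide (a.2.2 < b.2.2))))

-- sorted(logs, key=key): PySem's stable sort is foldl/insertBy with the key's '<'
def log_alt (logs : List String) : List String :=
  logs.foldl (fun acc x => PySem.List.insertBy (fun a b => logTupLt (logKey a) (logKey b)) x acc) []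

-- ===== PRECONDITION & SPEC =====
-- Pre_log excludes exactly the inputs where some log has fewer than two words: there
-- A's 'i.split()[1]' raises IndexError (B raises the same way).
def Pre_log (logs : List String) : Prop :=
  ∀ s ∈ logs, 2 ≤ (PySem.Str.split₀ s).length
instance (logs : List String) : Decidable (Pre_log logs) := by unfold Pre_log; infer_instance

def pvWitness_log : List String := ["a1 act foo", "z9 9 1", "b2 act bar"]

def Spec_log (logs : List String) (out : List String) : Prop := out = log_alt logs
instance (logs : List String) (out : List String) : Decidable (Spec_log logs out) := by unfold Spec_log; infer_instance

-- ===== CLAIM (what is proved, stated in full; the proofs are below) =====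
def Claim_equal_log : Prop := ∀ (logs : List String), Dom_log logs → Pre_log logs → Spec_log logs (log logs)

-- ===== LEMMAS AND PROOFS =====

-- abbreviations used only by the proofs
def logIsLetter (x : String) : Bool :=
  PySem.Str.strIsalpha (PySem.List.pyGetD (PySem.Str.split₀ x) 1 "")

def logLt2 (a b : String) : Bool :=
  decide (PySem.List.slice (PySem.Str.split₀ a) (some 1) none <
          PySem.List.slice (PySem.Str.split₀ b) (some 1) none) ||
  (!decide (PySem.List.slice (PySem.Str.split₀ b) (some 1) none <
            PySem.List.slice (PySem.Str.split₀ a) (some 1) none) &&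
   decide (PySem.List.pyGetD (PySem.Str.split₀ a) 0 "" <
           PySem.List.pyGetD (PySem.Str.split₀ b) 0 ""))

theorem logLt3_of_letters {a b : String} (ha : logIsLetter a = true) (hb : logIsLetter b = true) :
    logTupLt (logKey a) (logKey b) = logLt2 a b := by
  simp only [logIsLetter] at ha hb
  simp at ha hb
  simp [logTupLt, logKey, logLt2, ha, hb]

theorem logLt3_letter_number {a b : String} (ha : logIsLetter a = true) (hb : logIsLetter b = false) :
    logTupLt (logKey a) (logKey b) = true := by
  simp only [logIsLetter] at ha hb
  simp at ha hb
  simp [logTupLt, logKey, ha, hb]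

theorem logLt3_of_number {a : String} (b : String) (ha : logIsLetter a = false) :
    logTupLt (logKey a) (logKey b) = false := by
  simp only [logIsLetter] at ha
  simp at ha
  by_cases hb : PySem.Chars.strIsalpha (PySem.List.pyGetD (PySem.Str.split₀ b) 1 "").toList = true <;>
    simp [logTupLt, logKey, ha, hb]

theorem insertBy_congr_mem {α : Type} (f g : α → α → Bool) (x : α) (L : List α)
    (h : ∀ z ∈ L, f x z = g x z) :
    PySem.List.insertBy f x L = PySem.List.insertBy g x L := by
  induction L with
  | nil => rfl
  | cons y ys ih =>
    simp only [PySem.List.insertBy, h y (by simp)]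
    split <;> simp [ih (fun z hz => h z (by simp [hz]))]

theorem insertBy_append {α : Type} (before : α → α → Bool) (x : α) (L N : List α)
    (h : ∀ z ∈ N, before x z = true) :
    PySem.List.insertBy before x (L ++ N) = PySem.List.insertBy before x L ++ N := by
  induction L with
  | nil =>
    cases N with
    | nil => rfl
    | cons z zs => simp [PySem.List.insertBy, h z (by simp)]
  | cons y ys ih =>
    simp only [List.cons_append, PySem.List.insertBy]
    split <;> simp [ih]

-- the loop invariant: folding B's insertion over the remaining logs from a state
-- 'sorted letters ++ numbers' partitions and sorts exactly as A does
theorem log_loop_inv (logs : List String) :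
    ∀ (L N : List String), (∀ z ∈ L, logIsLetter z = true) → (∀ z ∈ N, logIsLetter z = false) →
    logs.foldl (fun acc x => PySem.List.insertBy (fun a b => logTupLt (logKey a) (logKey b)) x acc) (L ++ N)
      = ((logs.filter logIsLetter).foldl
          (fun acc x => PySem.List.insertBy (fun a b => logLt2 a b) x acc) L
        ++ N) ++ logs.filter (fun x => !logIsLetter x) := by
  induction logs with
  | nil => intro L N _ _; simp
  | cons x rest ih =>
    intro L N hL hN
    by_cases hx : logIsLetter x = true
    · have h1 : PySem.List.insertBy (fun a b => logTupLt (logKey a) (logKey b)) x (L ++ N)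
          = PySem.List.insertBy (fun a b => logTupLt (logKey a) (logKey b)) x L ++ N :=
        insertBy_append _ x L N (fun z hz => logLt3_letter_number hx (hN z hz))
      have h2 : PySem.List.insertBy (fun a b => logTupLt (logKey a) (logKey b)) x L
          = PySem.List.insertBy (fun a b => logLt2 a b) x L :=
        insertBy_congr_mem _ _ x L (fun z hz => logLt3_of_letters hx (hL z hz))
      have hL' : ∀ z ∈ PySem.List.insertBy (fun a b => logLt2 a b) x L, logIsLetter z = true := by
        intro z hz
        rcases (PySem.List.mem_insertBy _ x z L).1 hz with h | h
        · exact h ▸ hx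
        · exact hL z h
      have e1 : List.filter logIsLetter (x :: rest) = x :: List.filter logIsLetter rest := by
        simp [hx]
      have e2 : List.filter (fun y => !logIsLetter y) (x :: rest)
          = List.filter (fun y => !logIsLetter y) rest := by
        simp [hx]
      rw [List.foldl_cons, h1, h2, e1, e2, List.foldl_cons]
      exact ih _ N hL' hN
    · have hx' : logIsLetter x = false := by simpa using hx
      have h1 : PySem.List.insertBy (fun a b => logTupLt (logKey a) (logKey b)) x (L ++ N)
          = (L ++ N) ++ [x] :=
        PySem.List.insertBy_of_forall_not_before _ x (L ++ N)
          (fun z _ => logLt3_of_number z hx')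
      have hN' : ∀ z ∈ N ++ [x], logIsLetter z = false := by
        intro z hz
        rcases List.mem_append.1 hz with h | h
        · exact hN z h
        · simp at h; exact h ▸ hx'
      have e1 : List.filter logIsLetter (x :: rest) = List.filter logIsLetter rest := by
        simp [hx']
      have e2 : List.filter (fun y => !logIsLetter y) (x :: rest)
          = x :: List.filter (fun y => !logIsLetter y) rest := by
        simp [hx']
      rw [List.foldl_cons, h1, List.append_assoc, e1, e2,
        ih L (N ++ [x]) hL hN']
      simp [List.append_assoc]

-- A's partition loop appends each log to one of the two accumulators: it is the two filters
theorem log_partition (logs : List String) :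
    ∀ (A B : List String),
    logs.foldl
      (fun (acc : List String × List String) i =>
        if PySem.Str.strIsalpha (PySem.List.pyGetD (PySem.Str.split₀ i) 1 "")
        then (acc.1 ++ [i], acc.2)
        else (acc.1, acc.2 ++ [i])) (A, B)
      = (A ++ logs.filter logIsLetter, B ++ logs.filter (fun x => !logIsLetter x)) := by
  induction logs with
  | nil => intro A B; simp
  | cons x rest ih =>
    intro A B
    rw [List.foldl_cons]
    by_cases hx : logIsLetter x = true
    · have hx' : PySem.Str.strIsalpha (PySem.List.pyGetD (PySem.Str.split₀ x) 1 "") = true := hx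
      rw [if_pos hx', ih]
      simp [hx]
    · have hx2 : logIsLetter x = false := by simpa using hx
      have hx' : PySem.Str.strIsalpha (PySem.List.pyGetD (PySem.Str.split₀ x) 1 "") = false := hx2
      rw [if_neg (by simpa using hx'), ih]
      simp [hx2]

-- ===== VERDICT (by name: the statement is the Claim_ definition above) =====
theorem log_spec : Claim_equal_log := by
  intro logs _ _
  unfold Spec_log log log_alt
  rw [log_partition logs [] []]
  have h := log_loop_inv logs [] [] (by simp) (by simp)
  simp only [List.nil_append, List.append_nil] at h ⊢
  rw [h]
  rfl
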